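-- pv_equiv track=rewrite | github.com/BerBai/codedb | MarsCode/红包运气排行榜.py | solution
-- ===== SOURCE A (Python) =====
-- def solution(n: int, s: list, x: list) -> list:
--     ans = {}
--     # 存在一个人多次抢红包的情况
--     for i in range(n):
--         if s[i] not in ans:
--             ans[s[i]] = [x[i], i]
--         else:
--             ans[s[i]][0] += x[i]
--     # 将字典的值转换为列表并排序
--     sorted_values = sorted(ans.items(), key=lambda item: (-item[1][0], item[1][1]))
--
--     # 提取排序后的名字
--     sorted_names = [name for name, _ in sorted_values]
--
--     return sorted_names
-- ===== SOURCE B (Python) =====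
-- def solution(n: int, s: list, x: list) -> list:
--     # No dict and no library sort: one record per distinct name (built at its
--     # first occurrence, totalled by a direct scan), then selection-extraction.
--     order = []
--     for i in range(n):
--         if s[i] not in s[:i]:
--             total = 0
--             for j in range(n):
--                 if s[j] == s[i]:
--                     total += x[j]
--             order.append((total, i, s[i]))
--     res = []
--     while order:
--         best = min(order, key=lambda t: (-t[0], t[1]))
--         order.remove(best)
--         res.append(best[2])
--     return res
-- ===== Notes on version B (the rewrite author's own statement) =====
-- stated objective: alternative
-- what changed: B uses no dict and no library sort: it builds one (total, first_index, name) record per distinct name by a nested scan (membership test against the prefix, total by rescanning all n entries), then emits names by repeatedly extracting the minimum under key (-total, first_index) from the remaining records (selection), instead of A's dict aggregation followed by one sorted() call.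
import Mathlib
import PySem

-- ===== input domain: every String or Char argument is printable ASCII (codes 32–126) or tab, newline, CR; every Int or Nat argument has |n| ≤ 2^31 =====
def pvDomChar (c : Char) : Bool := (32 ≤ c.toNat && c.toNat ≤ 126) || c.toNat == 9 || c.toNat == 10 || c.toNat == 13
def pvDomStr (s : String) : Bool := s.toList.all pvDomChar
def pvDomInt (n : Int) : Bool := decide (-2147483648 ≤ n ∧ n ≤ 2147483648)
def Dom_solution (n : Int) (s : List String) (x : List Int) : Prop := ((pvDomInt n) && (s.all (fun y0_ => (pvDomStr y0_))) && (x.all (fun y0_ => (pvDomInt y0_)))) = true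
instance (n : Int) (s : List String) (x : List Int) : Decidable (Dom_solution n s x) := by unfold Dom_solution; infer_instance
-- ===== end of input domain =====

-- B uses no dict and no library sort: per-name records built by nested scans, then
-- selection-extraction of the best remaining record (objective: alternative).

-- ===== PORT A =====
def solution (n : Int) (s : List String) (x : List Int) : List String :=
  let ans : PySem.Dict String (Int × Int) :=
    (PySem.List.pyRange 0 n 1).foldl (fun ans i =>
      let si := (PySem.List.pyGet? s i).getD ""
      let xi := (PySem.List.pyGet? x i).getD 0
      if ans.contains si = false then ans.insert si (xi, i)
      else ans.insert si ((ans.getD si (0, 0)).1 + xi, (ans.getD si (0, 0)).2))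
      PySem.Dict.empty
  (PySem.List.sorted2 ans.items (fun it => -it.2.1) (fun it => it.2.2)).map (fun p => p.1)

-- ===== PORT B =====
-- the 'while order:' loop of Source B (fuel = initial length; each pass removes one record)
def solutionAltLoop (fuel : Nat) (order : List (Int × Int × String)) (res : List String) : List String :=
  match fuel with
  | 0 => res
  | fuel + 1 =>
    match PySem.List.min2? order (fun t => -t.1) (fun t => t.2.1) with
    | none => res
    | some best =>
      match PySem.List.remove? order best with
      | none => res
      | some rest => solutionAltLoop fuel rest (res ++ [best.2.2])

def solution_alt (n : Int) (s : List String) (x : List Int) : List String :=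
  let order : List (Int × Int × String) :=
    (PySem.List.pyRange 0 n 1).foldl (fun order i =>
      let si := (PySem.List.pyGet? s i).getD ""
      if (PySem.List.slice s none (some i)).contains si then order
      else
        let total := (PySem.List.pyRange 0 n 1).foldl (fun t j =>
          if (PySem.List.pyGet? s j).getD "" == si then t + (PySem.List.pyGet? x j).getD 0
          else t) 0
        order ++ [(total, i, si)]) []
  solutionAltLoop order.length order []

-- ===== PRECONDITION & SPEC =====
-- Pre_ excludes exactly the inputs where the Python A raises IndexError: n larger than len(s) or len(x).
def Pre_solution (n : Int) (s : List String) (x : List Int) : Prop :=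
  n ≤ (s.length : Int) ∧ n ≤ (x.length : Int)
instance (n : Int) (s : List String) (x : List Int) : Decidable (Pre_solution n s x) := by
  unfold Pre_solution; infer_instance
def pvWitness_solution : Int × List String × List Int := (3, ["a", "b", "a"], [1, 5, 2])

def Spec_solution (n : Int) (s : List String) (x : List Int) (out : List String) : Prop :=
  out = solution_alt n s x
instance (n : Int) (s : List String) (x : List Int) (out : List String) : Decidable (Spec_solution n s x out) := by
  unfold Spec_solution; infer_instance

-- ===== CLAIM =====
def Claim_equal_solution : Prop := ∀ (n : Int) (s : List String) (x : List Int),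
  Dom_solution n s x → Pre_solution n s x → Spec_solution n s x (solution n s x)

-- ===== LEMMAS AND PROOFS =====

def pvRangeN (m : Nat) : List Int := (List.range m).map (Nat.cast : Nat → Int)
-- s[i] / x[i] as total functions (as the ports read them)
def pvS (s : List String) (i : Int) : String := (PySem.List.pyGet? s i).getD ""
def pvX (x : List Int) (i : Int) : Int := (PySem.List.pyGet? x i).getD 0
-- i is the first occurrence of its name
def pvFresh (s : List String) (i : Nat) : Bool := decide (∀ j < i, pvS s j ≠ pvS s i)
-- total of name over indices < m
def pvTot (s : List String) (x : List Int) (m : Nat) (name : String) : Int :=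
  (pvRangeN m).foldl (fun t j => if pvS s j = name then t + pvX x j else t) 0
-- the (name, (total over tm, first index)) records after m loop steps
def pvItems (s : List String) (x : List Int) (m tm : Nat) : List (String × Int × Int) :=
  ((List.range m).filter (pvFresh s)).map
    (fun (i : Nat) => (pvS s (i : Int), pvTot s x tm (pvS s (i : Int)), (i : Int)))
def pvFlip (p : String × Int × Int) : Int × Int × String := (p.2.1, p.2.2, p.1)
def pvUnflip (t : Int × Int × String) : String × Int × Int := (t.2.2, t.1, t.2.1)
-- the two strict lexicographic comparators
def pvBlexA (a b : String × Int × Int) : Bool :=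
  decide (-a.2.1 < -b.2.1) || (!decide (-b.2.1 < -a.2.1) && decide (a.2.2 < b.2.2))
def pvBlexB (a b : Int × Int × String) : Bool :=
  decide (-a.1 < -b.1) || (!decide (-b.1 < -a.1) && decide (a.2.1 < b.2.1))
lemma pvPyRange_eq (n : Int) : PySem.List.pyRange 0 n 1 = pvRangeN n.toNat := by
  unfold pvRangeN
  rw [PySem.List.pyRange_one, Int.sub_zero]
  exact List.map_congr_left (fun k _ => zero_add _)

lemma pvBlexA_iff (a b : String × Int × Int) :
    pvBlexA a b = true ↔ (-a.2.1 < -b.2.1 ∨ (¬(-b.2.1 < -a.2.1) ∧ a.2.2 < b.2.2)) := by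
  simp [pvBlexA]

lemma pvBlexB_iff (a b : Int × Int × String) :
    pvBlexB a b = true ↔ (-a.1 < -b.1 ∨ (¬(-b.1 < -a.1) ∧ a.2.1 < b.2.1)) := by
  simp [pvBlexB]

lemma pvBlexA_asymm (a b : String × Int × Int) : pvBlexA a b = true → pvBlexA b a = false := by
  intro h; by_contra hb
  rw [pvBlexA_iff] at h
  have hb' := pvBlexA_iff b a |>.mp (by revert hb; cases pvBlexA b a <;> simp)
  omega

lemma pvBlexA_trans (a b c : String × Int × Int) :
    pvBlexA a b = true → pvBlexA b c = true → pvBlexA a c = true := by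
  intro h1 h2; rw [pvBlexA_iff] at *; omega

lemma pvBlexB_trans (a b c : Int × Int × String) :
    pvBlexB a b = true → pvBlexB b c = true → pvBlexB a c = true := by
  intro h1 h2; rw [pvBlexB_iff] at *; omega

lemma pvBlexB_negtrans (a b c : Int × Int × String) :
    pvBlexB a b = false → pvBlexB b c = false → pvBlexB a c = false := by
  intro h1 h2
  by_contra h
  have h' := pvBlexB_iff a c |>.mp (by revert h; cases pvBlexB a c <;> simp)
  have h1' : ¬ (pvBlexB a b = true) := by simp [h1]
  have h2' : ¬ (pvBlexB b c = true) := by simp [h2]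
  rw [pvBlexB_iff] at h1' h2'
  omega

lemma pvBlexA_antisymm (a b : String × Int × Int) :
    pvBlexA a b = false → pvBlexA b a = false → a.2.1 = b.2.1 ∧ a.2.2 = b.2.2 := by
  intro h1 h2
  have h1' : ¬ (pvBlexA a b = true) := by simp [h1]
  have h2' : ¬ (pvBlexA b a = true) := by simp [h2]
  rw [pvBlexA_iff] at h1' h2'
  omega

-- insertion sort produces a ≤-chain (le a b := before b a = false)
lemma pvInsertBy_pairwise {α : Type} (before : α → α → Bool)
    (hasymm : ∀ a b, before a b = true → before b a = false)
    (htrans : ∀ a b c, before a b = true → before b c = true → before a c = true)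
    (x : α) : ∀ l : List α, l.Pairwise (fun a b => before b a = false) →
    (PySem.List.insertBy before x l).Pairwise (fun a b => before b a = false) := by
  intro l
  induction l with
  | nil => intro _; simp [PySem.List.insertBy]
  | cons y ys ih =>
    intro h
    rcases List.pairwise_cons.mp h with ⟨hy, hys⟩
    simp only [PySem.List.insertBy]
    split
    · next hxy =>
      refine List.pairwise_cons.mpr ⟨?_, h⟩
      intro z hz
      rcases hz with _ | hz
      · exact hasymm _ _ hxy
      · rename_i hz
        by_contra hzx
        have hzx' : before z x = true := by revert hzx; cases before z x <;> simp
        have := htrans z x y hzx' hxy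
        rw [hy z hz] at this; exact Bool.false_ne_true this
    · next hxy =>
      refine List.pairwise_cons.mpr ⟨?_, ih hys⟩
      intro w hw
      rcases (PySem.List.mem_insertBy before x w ys).mp hw with rfl | hw'
      · revert hxy; cases before w y <;> simp
      · exact hy w hw'

lemma pvFoldl_insertBy_pairwise {α : Type} (before : α → α → Bool)
    (hasymm : ∀ a b, before a b = true → before b a = false)
    (htrans : ∀ a b c, before a b = true → before b c = true → before a c = true) :
    ∀ (l acc : List α), acc.Pairwise (fun a b => before b a = false) →
    (l.foldl (fun acc x => PySem.List.insertBy before x acc) acc).Pairwise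
      (fun a b => before b a = false) := by
  intro l
  induction l with
  | nil => intro acc h; exact h
  | cons z zs ih =>
    intro acc h
    exact ih _ (pvInsertBy_pairwise before hasymm htrans z acc h)

-- min2? on a nonempty list: a member that is ≤ everything (first minimum)
lemma pvBlexB_irrefl (a : Int × Int × String) : pvBlexB a a = false := by
  have h : ¬ (pvBlexB a a = true) := by rw [pvBlexB_iff]; omega
  revert h; cases pvBlexB a a <;> simp

lemma pvBool_not_true {b : Bool} (h : ¬ b = true) : b = false := by
  revert h; cases b <;> simp

lemma pvMin2_single (o : Int × Int × String) :
    PySem.List.min2? [o] (fun t => -t.1) (fun t => t.2.1) = some o := rfl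

lemma pvMin2_step (o z : Int × Int × String) (zs : List (Int × Int × String)) :
    PySem.List.min2? (o :: z :: zs) (fun t => -t.1) (fun t => t.2.1)
      = PySem.List.min2? ((if pvBlexB z o = true then z else o) :: zs) (fun t => -t.1) (fun t => t.2.1) := by
  show List.foldl _ _ zs = List.foldl _ _ zs
  congr 1
  by_cases h : pvBlexB z o = true
  · rw [if_pos h]
    have h' : (decide (-z.1 < -o.1) || !decide (-o.1 < -z.1) && decide (z.2.1 < o.2.1)) = true := h
    show (if (decide (-z.1 < -o.1) || !decide (-o.1 < -z.1) && decide (z.2.1 < o.2.1)) = true then some z else some o) = some z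
    rw [if_pos h']
  · rw [if_neg h]
    have h' : ¬ ((decide (-z.1 < -o.1) || !decide (-o.1 < -z.1) && decide (z.2.1 < o.2.1)) = true) := h
    show (if (decide (-z.1 < -o.1) || !decide (-o.1 < -z.1) && decide (z.2.1 < o.2.1)) = true then some z else some o) = some o
    rw [if_neg h']

lemma pvMin2_spec : ∀ (os : List (Int × Int × String)) (o : Int × Int × String),
    ∃ m, PySem.List.min2? (o :: os) (fun t => -t.1) (fun t => t.2.1) = some m ∧
      m ∈ o :: os ∧ ∀ y ∈ o :: os, pvBlexB y m = false := by
  intro os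
  induction os with
  | nil =>
    intro o
    refine ⟨o, pvMin2_single o, by simp, ?_⟩
    intro y hy; simp at hy; subst hy; exact pvBlexB_irrefl y
  | cons z zs ih =>
    intro o
    rw [pvMin2_step]
    by_cases h : pvBlexB z o = true
    · rw [if_pos h]
      obtain ⟨m, hm, hmem, hall⟩ := ih z
      refine ⟨m, hm, ?_, ?_⟩
      · rcases List.mem_cons.mp hmem with rfl | hmm
        · simp
        · simp [hmm]
      · intro y hy
        rcases List.mem_cons.mp hy with rfl | hy'
        · by_contra hom
          have hom' : pvBlexB y m = true := by revert hom; cases pvBlexB y m <;> simp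
          have := pvBlexB_trans z y m h hom'
          rw [hall z List.mem_cons_self] at this
          exact Bool.false_ne_true this
        · exact hall y hy'
    · rw [if_neg h]
      have h' : pvBlexB z o = false := pvBool_not_true h
      obtain ⟨m, hm, hmem, hall⟩ := ih o
      refine ⟨m, hm, ?_, ?_⟩
      · rcases List.mem_cons.mp hmem with rfl | hmm
        · simp
        · simp [hmm]
      · intro y hy
        rcases List.mem_cons.mp hy with rfl | hy'
        · exact hall y List.mem_cons_self
        · rcases List.mem_cons.mp hy' with rfl | hy''
          · exact pvBlexB_negtrans y o m h' (hall o List.mem_cons_self)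
          · exact hall y (by simp [hy''])

-- the selection loop: emits the records of a ≤-sorted permutation of order
lemma pvSelLoop_spec : ∀ (fuel : Nat) (order : List (Int × Int × String)) (res : List String),
    order.length ≤ fuel →
    ∃ L : List (Int × Int × String), solutionAltLoop fuel order res = res ++ L.map (fun t => t.2.2) ∧
      L.Perm order ∧ L.Pairwise (fun a b => pvBlexB b a = false) := by
  intro fuel
  induction fuel with
  | zero =>
    intro order res h
    have : order = [] := List.length_eq_zero_iff.mp (Nat.le_zero.mp h)
    subst this
    exact ⟨[], by simp [solutionAltLoop], List.Perm.refl _, List.Pairwise.nil⟩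
  | succ fuel ih =>
    intro order res h
    cases order with
    | nil =>
      refine ⟨[], ?_, List.Perm.refl _, List.Pairwise.nil⟩
      simp [solutionAltLoop, PySem.List.min2?]
    | cons o os =>
      obtain ⟨best, hmin, hmem, hall⟩ := pvMin2_spec os o
      have hrem := PySem.List.remove?_eq_some_erase (o :: os) best hmem
      have hlen : ((o :: os).erase best).length ≤ fuel := by
        rw [List.length_erase_of_mem hmem]
        simp at h ⊢; omega
      obtain ⟨L', hL', hperm', hpw'⟩ := ih ((o :: os).erase best) (res ++ [best.2.2]) hlen
      refine ⟨best :: L', ?_, ?_, ?_⟩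
      · simp only [solutionAltLoop, hmin, hrem, hL', List.map_cons]
        simp
      · exact (hperm'.cons best).trans (List.perm_cons_erase hmem).symm
      · refine List.pairwise_cons.mpr ⟨?_, hpw'⟩
        intro y hy
        have : y ∈ (o :: os).erase best := hperm'.mem_iff.mp hy
        exact hall y (List.mem_of_mem_erase this)

-- characterization of A's dict loop
lemma pvTot_succ (s : List String) (x : List Int) (m : Nat) (name : String) :
    pvTot s x (m + 1) name
      = if pvS s m = name then pvTot s x m name + pvX x m else pvTot s x m name := by
  unfold pvTot pvRangeN
  rw [List.range_succ, List.map_append, List.foldl_append]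
  simp only [List.map_cons, List.map_nil, List.foldl_cons, List.foldl_nil]

lemma pvTot_zero_of_unseen (s : List String) (x : List Int) :
    ∀ (m : Nat) (name : String), (∀ j < m, pvS s j ≠ name) → pvTot s x m name = 0 := by
  intro m
  induction m with
  | zero => intro name _; simp [pvTot, pvRangeN]
  | succ m ih =>
    intro name h
    rw [pvTot_succ, if_neg (h m (by omega)), ih name (fun j hj => h j (by omega))]

lemma pvExists_fresh (s : List String) (m : Nat) (v : String)
    (h : ∃ j, j < m ∧ pvS s j = v) : ∃ i < m, pvFresh s i = true ∧ pvS s i = v := by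
  classical
  have h' : ∃ j, pvS s (j : Nat) = v := ⟨h.choose, h.choose_spec.2⟩
  let k := Nat.find h'
  have hk : pvS s (k : Nat) = v := Nat.find_spec h'
  have hkmin : ∀ l < k, pvS s (l : Nat) ≠ v := fun l hl => Nat.find_min h' hl
  refine ⟨k, ?_, ?_, hk⟩
  · have : k ≤ h.choose := Nat.find_min' h' h.choose_spec.2
    omega
  · unfold pvFresh
    rw [decide_eq_true_iff]
    intro j hj
    rw [hk]
    exact hkmin j hj

lemma pvFresh_name_inj (s : List String) (i i' : Nat)
    (hi : pvFresh s i = true) (hi' : pvFresh s i' = true) (h : pvS s i = pvS s i') : i = i' := by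
  unfold pvFresh at hi hi'
  rw [decide_eq_true_iff] at hi hi'
  rcases Nat.lt_trichotomy i i' with hlt | heq | hgt
  · exact absurd h (hi' i hlt)
  · exact heq
  · exact absurd h.symm (hi i' hgt)

lemma pvItems_keys_nodup (s : List String) (x : List Int) (m tm : Nat) :
    ((pvItems s x m tm).map (fun p => p.1)).Nodup := by
  unfold pvItems
  rw [List.map_map]
  have hpw : ((List.range m).filter (pvFresh s)).Pairwise
      (fun (i j : Nat) => pvS s (i : Int) ≠ pvS s (j : Int)) := by
    have h1 : ((List.range m).filter (pvFresh s)).Pairwise (· < ·) :=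
      (List.pairwise_lt_range).filter _
    refine h1.imp_of_mem ?_
    intro a b ha hb hab hEq
    have hfb : pvFresh s b = true := (List.mem_filter.mp hb).2
    have hfa : pvFresh s a = true := (List.mem_filter.mp ha).2
    have := pvFresh_name_inj s a b hfa hfb hEq
    omega
  exact List.Pairwise.map _ (fun {a b} h => h) hpw

lemma pvItems_idx_pairwise (s : List String) (x : List Int) (m tm : Nat) :
    (pvItems s x m tm).Pairwise (fun a b => a.2.2 < b.2.2) := by
  unfold pvItems
  rw [List.pairwise_map]
  have h1 : ((List.range m).filter (pvFresh s)).Pairwise (· < ·) :=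
    (List.pairwise_lt_range).filter _
  exact h1.imp (by intro a b h; simp; omega)

lemma pvDict_eq_mk {κ ν : Type} (d : PySem.Dict κ ν) (l : List (κ × ν)) (h : d.items = l) :
    d = PySem.Dict.mk l := by
  cases d; cases h; rfl

lemma pvS_def (s : List String) (i : Int) : (PySem.List.pyGet? s i).getD "" = pvS s i := rfl
lemma pvX_def (x : List Int) (i : Int) : (PySem.List.pyGet? x i).getD 0 = pvX x i := rfl

lemma pvRangeN_succ (m : Nat) : pvRangeN (m + 1) = pvRangeN m ++ [(m : Int)] := by
  unfold pvRangeN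
  rw [List.range_succ, List.map_append]
  rfl

lemma pvFresh_iff (s : List String) (m : Nat) :
    pvFresh s m = true ↔ ∀ j < m, pvS s (j : Int) ≠ pvS s (m : Int) := by
  unfold pvFresh; rw [decide_eq_true_iff]

lemma pvContains_iff (s : List String) (x : List Int) (m tm : Nat) :
    ((PySem.Dict.mk (pvItems s x m tm)).contains (pvS s (m : Int)) = true)
      ↔ ¬ (pvFresh s m = true) := by
  rw [PySem.Dict.contains_eq_decide_mem_keys, PySem.Dict.keys_mk]
  unfold pvItems
  rw [List.map_map, decide_eq_true_iff]
  constructor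
  · intro hmem hfresh
    rcases List.mem_map.mp hmem with ⟨i, hi, hEq⟩
    have hi' := List.mem_filter.mp hi
    have hilt : i < m := List.mem_range.mp hi'.1
    exact (pvFresh_iff s m).mp hfresh i hilt hEq
  · intro hnf
    rw [pvFresh_iff] at hnf
    push_neg at hnf
    obtain ⟨j, hj, hEq⟩ := hnf
    obtain ⟨i, him, hif, hiname⟩ := pvExists_fresh s m (pvS s (m : Int)) ⟨j, hj, hEq⟩
    exact List.mem_map.mpr ⟨i, List.mem_filter.mpr ⟨List.mem_range.mpr him, hif⟩, hiname⟩

lemma pvGet?_of_fresh (s : List String) (x : List Int) (m tm : Nat) (i0 : Nat)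
    (h : i0 < m) (hf : pvFresh s i0 = true) :
    (PySem.Dict.mk (pvItems s x m tm)).get? (pvS s (i0 : Int))
      = some (pvTot s x tm (pvS s (i0 : Int)), (i0 : Int)) := by
  apply PySem.Dict.get?_of_mem_items
  · show _ ∈ pvItems s x m tm
    unfold pvItems
    exact List.mem_map.mpr ⟨i0, List.mem_filter.mpr ⟨List.mem_range.mpr h, hf⟩, rfl⟩
  · rw [PySem.Dict.keys_mk]
    exact pvItems_keys_nodup s x m tm

lemma pvA_loop (s : List String) (x : List Int) : ∀ m : Nat,
    (pvRangeN m).foldl (fun ans i =>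
      let si := (PySem.List.pyGet? s i).getD ""
      let xi := (PySem.List.pyGet? x i).getD 0
      if ans.contains si = false then ans.insert si (xi, i)
      else ans.insert si ((ans.getD si (0, 0)).1 + xi, (ans.getD si (0, 0)).2))
      PySem.Dict.empty
    = PySem.Dict.mk (pvItems s x m m) := by
  intro m
  induction m with
  | zero => rfl
  | succ m ih =>
    rw [pvRangeN_succ, List.foldl_append, ih]
    simp only [List.foldl_cons, List.foldl_nil, pvS_def, pvX_def]
    by_cases hf : pvFresh s m = true
    · -- fresh name: append
      have hc : (PySem.Dict.mk (pvItems s x m m)).contains (pvS s (m : Int)) = false := by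
        have := pvContains_iff s x m m
        cases hcc : (PySem.Dict.mk (pvItems s x m m)).contains (pvS s (m : Int))
        · rfl
        · exact absurd hf (this.mp hcc)
      rw [if_pos hc]
      apply pvDict_eq_mk
      rw [PySem.Dict.items_insert_of_not_contains _ _ hc]
      show pvItems s x m m ++ _ = _
      unfold pvItems
      rw [List.range_succ, List.filter_append, List.map_append]
      have hfm : (List.filter (pvFresh s) [m]) = [m] := by simp [hf]
      rw [hfm]
      congr 1
      · apply List.map_congr_left
        intro i hi
        have hilt : i < m := List.mem_range.mp (List.mem_filter.mp hi).1
        have hne : pvS s ((m : Nat) : Int) ≠ pvS s (i : Int) :=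
          fun hEq => (pvFresh_iff s m).mp hf i hilt hEq.symm
        rw [pvTot_succ, if_neg hne]
      · simp only [List.map_cons, List.map_nil]
        have h0 : pvTot s x m (pvS s (m : Int)) = 0 :=
          pvTot_zero_of_unseen s x m _ ((pvFresh_iff s m).mp hf)
        rw [pvTot_succ, if_pos rfl, h0, zero_add]
    · -- seen name: overwrite in place
      have hc : (PySem.Dict.mk (pvItems s x m m)).contains (pvS s (m : Int)) = true :=
        (pvContains_iff s x m m).mpr hf
      rw [if_neg (by simp [hc])]
      -- first occurrence i0 of this name
      have hseen : ∃ j, j < m ∧ pvS s (j : Int) = pvS s (m : Int) := by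
        rw [pvFresh_iff] at hf
        push_neg at hf
        exact hf
      obtain ⟨i0, hi0, hif0, hiname⟩ := pvExists_fresh s m (pvS s (m : Int)) hseen
      have hget : (PySem.Dict.mk (pvItems s x m m)).get? (pvS s (m : Int))
          = some (pvTot s x m (pvS s (m : Int)), (i0 : Int)) := by
        have := pvGet?_of_fresh s x m m i0 hi0 hif0
        rw [hiname] at this
        exact this
      have hgetD : (PySem.Dict.mk (pvItems s x m m)).getD (pvS s (m : Int)) (0, 0)
          = (pvTot s x m (pvS s (m : Int)), (i0 : Int)) := by
        rw [PySem.Dict.getD_eq_get?_getD, hget]; rfl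
      rw [hgetD]
      apply pvDict_eq_mk
      rw [PySem.Dict.items_insert_of_contains _ _ hc]
      show List.map _ (pvItems s x m m) = _
      have hfilter : List.filter (pvFresh s) (List.range (m + 1))
          = List.filter (pvFresh s) (List.range m) := by
        rw [List.range_succ, List.filter_append]
        simp [hf]
      unfold pvItems
      rw [hfilter, List.map_map]
      apply List.map_congr_left
      intro i hi
      have hilt : i < m := List.mem_range.mp (List.mem_filter.mp hi).1
      have hifr : pvFresh s i = true := (List.mem_filter.mp hi).2
      simp only [Function.comp]
      by_cases hEq : pvS s (i : Int) = pvS s (m : Int)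
      · have hii0 : i = i0 := pvFresh_name_inj s i i0 hifr hif0 (by rw [hEq, hiname])
        have hbeq : ((pvS s (i : Int), pvTot s x m (pvS s (i : Int)), (i : Int)).1
            == pvS s (m : Int)) = true := by
          rw [beq_iff_eq]; exact hEq
        rw [if_pos hbeq, pvTot_succ, if_pos hEq.symm]
        subst hii0
        rw [hEq]
      · have hbeq : ((pvS s (i : Int), pvTot s x m (pvS s (i : Int)), (i : Int)).1
            == pvS s (m : Int)) = false := by
          rw [beq_eq_false_iff_ne]; exact hEq
        rw [if_neg (by rw [hbeq]; exact Bool.false_ne_true)]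
        rw [pvTot_succ, if_neg (fun h => hEq h.symm)]

lemma pvTot_port (N : Nat) (s : List String) (x : List Int) (si : String) :
    (pvRangeN N).foldl (fun t j =>
      if pvS s j == si then t + pvX x j else t) 0 = pvTot s x N si := by
  unfold pvTot
  simp only [beq_iff_eq]

lemma pvItems_succ_fresh (s : List String) (x : List Int) (m tm : Nat)
    (hf : pvFresh s m = true) :
    pvItems s x (m + 1) tm
      = pvItems s x m tm ++ [(pvS s (m : Int), pvTot s x tm (pvS s (m : Int)), (m : Int))] := by
  unfold pvItems
  rw [List.range_succ, List.filter_append]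
  have hfm : (List.filter (pvFresh s) [m]) = [m] := by simp [hf]
  rw [hfm, List.map_append]
  rfl

lemma pvItems_succ_seen (s : List String) (x : List Int) (m tm : Nat)
    (hf : ¬ (pvFresh s m = true)) :
    pvItems s x (m + 1) tm = pvItems s x m tm := by
  unfold pvItems
  rw [List.range_succ, List.filter_append]
  have hfm : (List.filter (pvFresh s) [m]) = [] := by simp [hf]
  rw [hfm, List.append_nil]

lemma pvS_getElem (s : List String) (j : Nat) (hj : j < s.length) : pvS s (j : Int) = s[j] := by
  unfold pvS
  rw [PySem.List.pyGet?_eq_some_getElem s (i := (j : Int)) (by omega) (by simpa using hj)]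
  simp

lemma pvSlice_contains_iff (s : List String) (m : Nat) (hm : m < s.length) :
    ((PySem.List.slice s none (some (m : Int))).contains (pvS s (m : Int)) = true)
      ↔ ¬ (pvFresh s m = true) := by
  rw [PySem.List.slice_to_natCast, List.contains_iff_mem, pvFresh_iff]
  push_neg
  constructor
  · intro hmem
    rcases List.mem_iff_getElem.mp hmem with ⟨k, hk, hEq⟩
    have hk' : k < m := by
      have h2 := hk; rw [List.length_take] at h2; omega
    rw [List.getElem_take] at hEq
    exact ⟨k, hk', by rw [pvS_getElem s k (by omega)]; exact hEq⟩
  · intro ⟨j, hj, hEq⟩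
    apply List.mem_iff_getElem.mpr
    refine ⟨j, by rw [List.length_take]; omega, ?_⟩
    rw [List.getElem_take, ← pvS_getElem s j (by omega)]
    exact hEq

lemma pvB_loop (n : Int) (s : List String) (x : List Int) (hlen : n.toNat ≤ s.length) :
    ∀ m : Nat, m ≤ n.toNat →
    (pvRangeN m).foldl (fun order i =>
      let si := (PySem.List.pyGet? s i).getD ""
      if (PySem.List.slice s none (some i)).contains si then order
      else
        let total := (pvRangeN n.toNat).foldl (fun t j =>
          if (PySem.List.pyGet? s j).getD "" == si then t + (PySem.List.pyGet? x j).getD 0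
          else t) 0
        order ++ [(total, i, si)]) []
    = (pvItems s x m n.toNat).map pvFlip := by
  intro m
  induction m with
  | zero => intro _; rfl
  | succ m ih =>
    intro hm1
    rw [pvRangeN_succ, List.foldl_append, ih (by omega)]
    simp only [List.foldl_cons, List.foldl_nil, pvS_def, pvX_def]
    by_cases hf : pvFresh s m = true
    · have hc : ((PySem.List.slice s none (some (m : Int))).contains (pvS s (m : Int))) = false := by
        cases hcc : ((PySem.List.slice s none (some (m : Int))).contains (pvS s (m : Int)))
        · rfl
        · exact absurd hf ((pvSlice_contains_iff s m (by omega)).mp hcc)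
      rw [if_neg (by rw [hc]; exact Bool.false_ne_true)]
      rw [pvTot_port, pvItems_succ_fresh s x m n.toNat hf, List.map_append]
      rfl
    · have hc : ((PySem.List.slice s none (some (m : Int))).contains (pvS s (m : Int))) = true :=
        (pvSlice_contains_iff s m (by omega)).mpr hf
      rw [if_pos hc, pvItems_succ_seen s x m n.toNat hf]

lemma pvPairwise_idx_inj : ∀ (l : List (String × Int × Int)),
    l.Pairwise (fun a b => a.2.2 < b.2.2) →
    ∀ a ∈ l, ∀ b ∈ l, a.2.2 = b.2.2 → a = b := by
  intro l
  induction l with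
  | nil => intro _ a ha; simp at ha
  | cons h tl ih =>
    intro hpw a ha b hb hEq
    rcases List.pairwise_cons.mp hpw with ⟨hhd, htl⟩
    rcases List.mem_cons.mp ha with rfl | ha'
    · rcases List.mem_cons.mp hb with rfl | hb'
      · rfl
      · have := hhd b hb'; omega
    · rcases List.mem_cons.mp hb with rfl | hb'
      · have := hhd a ha'; omega
      · exact ih htl a ha' b hb' hEq

lemma pvUnflip_flip (p : String × Int × Int) : pvUnflip (pvFlip p) = p := rfl

lemma pvBlexA_unflip (u v : Int × Int × String) :
    pvBlexA (pvUnflip u) (pvUnflip v) = pvBlexB u v := rfl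

-- ===== VERDICT (by name: the statement is the Claim_ definition above) =====
theorem solution_spec : Claim_equal_solution := by
  intro n s x _ hpre
  have hNs : n.toNat ≤ s.length := by
    rcases hpre with ⟨h1, _⟩
    omega
  unfold Spec_solution solution solution_alt
  rw [pvPyRange_eq]
  dsimp only
  rw [pvA_loop s x n.toNat, pvB_loop n s x hNs n.toNat (le_refl _)]
  obtain ⟨L, hL, hperm, hpw⟩ :=
    pvSelLoop_spec ((pvItems s x n.toNat n.toNat).map pvFlip).length
      ((pvItems s x n.toNat n.toNat).map pvFlip) [] (le_refl _)
  rw [hL, List.nil_append]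
  have hitems : (PySem.Dict.mk (pvItems s x n.toNat n.toNat)).items
      = pvItems s x n.toNat n.toNat := rfl
  rw [hitems]
  have hsorted_eq : PySem.List.sorted2 (pvItems s x n.toNat n.toNat)
        (fun it => -it.2.1) (fun it => it.2.2)
      = (pvItems s x n.toNat n.toNat).foldl
          (fun acc y => PySem.List.insertBy pvBlexA y acc) [] := rfl
  have hSA_pw : ((pvItems s x n.toNat n.toNat).foldl
        (fun acc y => PySem.List.insertBy pvBlexA y acc) []).Pairwise
        (fun a b => pvBlexA b a = false) :=
    pvFoldl_insertBy_pairwise pvBlexA pvBlexA_asymm pvBlexA_trans _ [] List.Pairwise.nil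
  have hSA_perm : ((pvItems s x n.toNat n.toNat).foldl
        (fun acc y => PySem.List.insertBy pvBlexA y acc) []).Perm
        (pvItems s x n.toNat n.toNat) := by
    rw [← hsorted_eq]
    exact PySem.List.sorted2_perm _ _ _ _
  have hL0_perm : (L.map pvUnflip).Perm (pvItems s x n.toNat n.toNat) := by
    have h1 := hperm.map pvUnflip
    rw [List.map_map] at h1
    have h2 : List.map (pvUnflip ∘ pvFlip) (pvItems s x n.toNat n.toNat)
        = pvItems s x n.toNat n.toNat := by
      apply List.map_congr_left ?_ |>.trans (List.map_id _)
      intro a _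
      exact pvUnflip_flip a
    rw [h2] at h1
    exact h1
  have hL0_pw : (L.map pvUnflip).Pairwise (fun a b => pvBlexA b a = false) := by
    rw [List.pairwise_map]
    refine hpw.imp ?_
    intro a b h
    rw [pvBlexA_unflip]
    exact h
  have hanti : ∀ (a b : String × Int × Int),
      a ∈ ((pvItems s x n.toNat n.toNat).foldl
        (fun acc y => PySem.List.insertBy pvBlexA y acc) []) →
      b ∈ L.map pvUnflip →
      pvBlexA b a = false → pvBlexA a b = false → a = b := by
    intro a b haIn hbIn h1 h2
    have haI : a ∈ pvItems s x n.toNat n.toNat := hSA_perm.mem_iff.mp haIn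
    have hbI : b ∈ pvItems s x n.toNat n.toNat := hL0_perm.mem_iff.mp hbIn
    have := pvBlexA_antisymm a b h2 h1
    exact pvPairwise_idx_inj _ (pvItems_idx_pairwise s x n.toNat n.toNat) a haI b hbI this.2
  have hmain : ((pvItems s x n.toNat n.toNat).foldl
        (fun acc y => PySem.List.insertBy pvBlexA y acc) [])
      = L.map pvUnflip :=
    List.eq_of_perm_of_sorted (le := fun a b => pvBlexA b a = false) hanti hSA_pw hL0_pw
      (hSA_perm.trans hL0_perm.symm)
  rw [hsorted_eq, hmain, List.map_map]
  rfl
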